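-- pv_equiv track=rewrite | github.com/VagaVesi/annual_report | tools/pattern.py | make_pattern
-- ===== SOURCE A (Python) =====
-- def make_pattern(elements: list) -> str:
--     """Make regex pattern based list"""
--     pattern = ""
--     if len(elements) > 1:
--         pattern = pattern + "^"
--         for x in range(len(elements[0])):
--             combinations = set()
--             for item in elements:
--                 combinations.add(item[x])
--             combinations = sorted(list(combinations))
--             string_list = ""
--             for item in combinations:
--                 string_list = string_list + item
--             if len(string_list) == 1:
--                 pattern = pattern + string_list
--             else:
--                 pattern = pattern + "[" + string_list + "]"
--     else:
--         pattern = "^" + elements[0]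
--     if pattern.count("*") > 0:
--         for x in range(pattern.count("*"), 0, -1):
--             string_count = "\\d{" + str(x) + "}"
--             replace_string = x * "*"
--             pattern = pattern.replace(replace_string, string_count)
--     pattern = pattern + "$"
--     return pattern
-- ===== SOURCE B (Python) =====
-- def make_pattern(elements: list) -> str:
--     """Make regex pattern based list"""
--     if len(elements) > 1:
--         cols = []
--         for x in range(len(elements[0])):
--             s = "".join(sorted({item[x] for item in elements}))
--             cols.append(s if len(s) == 1 else "[" + s + "]")
--         pattern = "^" + "".join(cols)
--     else:
--         pattern = "^" + elements[0]
--     # single pass: each maximal run of m stars becomes \d{m}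
--     out = []
--     run = 0
--     for ch in pattern:
--         if ch == "*":
--             run += 1
--         elif run != 0:
--             out.append("\\d{" + str(run) + "}")
--             out.append(ch)
--             run = 0
--         else:
--             out.append(ch)
--     if run != 0:
--         out.append("\\d{" + str(run) + "}")
--     out.append("$")
--     return "".join(out)
-- ===== Notes on version B (the rewrite author's own statement) =====
-- stated objective: simpler
-- what changed: The star post-processing loop (count('*') repeated global str.replace passes, one per run length from count down to 1) is replaced by a single left-to-right pass with a run counter that emits \d{m} for each maximal run of m stars; the column part builds the pattern by map+join instead of repeated concatenation into a string accumulator.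
import Mathlib
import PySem

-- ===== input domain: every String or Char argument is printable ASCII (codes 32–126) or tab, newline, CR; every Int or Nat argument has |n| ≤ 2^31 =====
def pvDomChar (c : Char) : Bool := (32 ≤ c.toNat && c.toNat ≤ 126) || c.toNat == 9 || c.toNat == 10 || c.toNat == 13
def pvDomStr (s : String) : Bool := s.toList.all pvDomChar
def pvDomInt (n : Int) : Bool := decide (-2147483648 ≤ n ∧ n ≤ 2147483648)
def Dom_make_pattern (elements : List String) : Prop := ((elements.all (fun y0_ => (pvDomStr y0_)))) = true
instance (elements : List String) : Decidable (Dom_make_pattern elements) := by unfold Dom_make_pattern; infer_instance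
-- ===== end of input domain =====

-- B differs from A: A's star post-processing (count('*') successive global replace passes) is replaced in B by a
-- single left-to-right pass with a run counter emitting \d{m} per maximal star run; columns are built by map+join
-- instead of repeated concatenation into an accumulator (objective: simpler).

-- ===== PORT A =====
-- works on List Char (PySem.Chars) and wraps to String at the end; string concatenation is List.append (exact)
def make_pattern_list (elements : List String) : List Char :=
  let pattern : List Char := []
  let pattern :=
    if 1 < elements.length then
      let pattern := pattern ++ ['^']
      (PySem.List.pyRange 0 ((((PySem.List.pyGet? elements 0).getD "").toList.length : Int)) 1).foldl
        (fun pattern x =>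
          let combinations : PySem.Set Char :=
            elements.foldl (fun s item => PySem.Set.add s ((PySem.Str.pyGet? item x).getD ' ')) PySem.Set.empty
          let combinations := PySem.List.sorted combinations (fun c => c) false
          let string_list : List Char := combinations.foldl (fun s c => s ++ [c]) []
          if string_list.length = 1 then pattern ++ string_list
          else pattern ++ ['['] ++ string_list ++ [']'])
        pattern
    else ['^'] ++ ((PySem.List.pyGet? elements 0).getD "").toList
  let pattern :=
    if 0 < PySem.Chars.count pattern ['*'] then
      (PySem.List.pyRange (PySem.Chars.count pattern ['*']) 0 (-1)).foldl
        (fun pattern x =>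
          PySem.Chars.replace pattern (List.replicate x.toNat '*')
            ('\\' :: 'd' :: '{' :: (PySem.Int.toStr x).toList ++ ['}']))
        pattern
    else pattern
  pattern ++ ['$']

def make_pattern (elements : List String) : String :=
  String.ofList (make_pattern_list elements)

-- ===== PORT B =====
def make_pattern_alt_list (elements : List String) : List Char :=
  let pattern : List Char :=
    if 1 < elements.length then
      '^' :: ((PySem.List.pyRange 0 ((((PySem.List.pyGet? elements 0).getD "").toList.length : Int)) 1).map
        (fun x =>
          let s := PySem.List.sorted
            (PySem.Set.ofList (elements.map (fun item => (PySem.Str.pyGet? item x).getD ' ')))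
            (fun c => c) false
          if s.length = 1 then s else '[' :: (s ++ [']']))).flatten
    else '^' :: ((PySem.List.pyGet? elements 0).getD "").toList
  let st := pattern.foldl
    (fun (st : List Char × Nat) ch =>
      if ch = '*' then (st.1, st.2 + 1)
      else if st.2 ≠ 0 then (st.1 ++ ('\\' :: 'd' :: '{' :: (PySem.Int.toStr (st.2 : Int)).toList ++ ['}']) ++ [ch], 0)
      else (st.1 ++ [ch], st.2))
    ([], 0)
  (if st.2 ≠ 0 then st.1 ++ ('\\' :: 'd' :: '{' :: (PySem.Int.toStr (st.2 : Int)).toList ++ ['}']) else st.1) ++ ['$']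

def make_pattern_alt (elements : List String) : String :=
  String.ofList (make_pattern_alt_list elements)

-- ===== PRECONDITION & SPEC =====
-- Pre_ excludes exactly the inputs on which the Python A raises IndexError: the empty list
-- (elements[0]) and, when len(elements) > 1, any element shorter than elements[0] (item[x]).
def Pre_make_pattern (elements : List String) : Prop :=
  elements ≠ [] ∧
  (1 < elements.length → ∀ s ∈ elements, (elements.headD "").toList.length ≤ s.toList.length)
instance (elements : List String) : Decidable (Pre_make_pattern elements) := by
  unfold Pre_make_pattern; infer_instance
def pvWitness_make_pattern : List String := ["ab*", "a**"]

def Spec_make_pattern (elements : List String) (out : String) : Prop := out = make_pattern_alt elements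
instance (elements : List String) (out : String) : Decidable (Spec_make_pattern elements out) := by
  unfold Spec_make_pattern; infer_instance

-- ===== CLAIM (what is proved, stated in full; the proofs are below) =====
def Claim_equal_make_pattern : Prop := ∀ (elements : List String), Dom_make_pattern elements → Pre_make_pattern elements → Spec_make_pattern elements (make_pattern elements)

-- ===== LEMMAS AND PROOFS =====

-- the replacement text "\d{n}"
def pvD (n : Nat) : List Char := '\\' :: 'd' :: '{' :: (PySem.Int.toStr (n : Int)).toList ++ ['}']

-- structural model of Python's str.replace (old ≠ [])
def pvRep (old new : List Char) : List Char → List Char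
  | [] => []
  | c :: t =>
    if old.isPrefixOf (c :: t) then new ++ pvRep old new (t.drop (old.length - 1))
    else c :: pvRep old new t
termination_by l => l.length
decreasing_by
  all_goals simp <;> omega

-- B's single pass, with the pending star-run count as parameter
def pvB : List Char → Nat → List Char
  | [], run => if run = 0 then [] else pvD run
  | c :: t, run =>
    if c = '*' then pvB t (run + 1)
    else (if run = 0 then [] else pvD run) ++ c :: pvB t 0

-- "every all-star infix has length ≤ x": all star runs bounded by x
def pvRunsLE (x : Nat) (l : List Char) : Prop :=
  ∀ w : List Char, w <:+: l → (∀ c ∈ w, c = '*') → w.length ≤ x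

-- ---- digits of a number contain no '*' ----
lemma pv_toDigitsCore_ne_star : ∀ (fuel n : Nat) (ds : List Char),
    (∀ c ∈ ds, c ≠ '*') → ∀ c ∈ Nat.toDigitsCore 10 fuel n ds, c ≠ '*' := by
  intro fuel
  induction fuel with
  | zero => intro n ds h; simpa [Nat.toDigitsCore] using h
  | succ f ih =>
    intro n ds h
    rw [Nat.toDigitsCore]
    have hd : (n % 10).digitChar ≠ '*' := by
      have : n % 10 < 10 := Nat.mod_lt _ (by norm_num)
      interval_cases h : n % 10 <;> simp [Nat.digitChar]
    split
    · intro c hc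
      rcases List.mem_cons.mp hc with rfl | hc
      · exact hd
      · exact h _ hc
    · exact ih _ _ (by intro c hc; rcases List.mem_cons.mp hc with rfl | hc; exacts [hd, h _ hc])

lemma pvD_ne_star (n : Nat) : ∀ c ∈ pvD n, c ≠ '*' := by
  intro c hc
  simp only [pvD, PySem.Int.toList_toStr, PySem.Int.toChars, List.mem_cons, List.mem_append,
    List.mem_singleton] at hc
  rw [if_neg (by omega), Int.toNat_natCast] at hc
  have hds := pv_toDigitsCore_ne_star (n + 1) n [] (by simp)
  rcases hc with (rfl | rfl | rfl | hc) | (rfl | h0)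
  case _ => decide
  case _ => decide
  case _ => decide
  case _ => exact hds c (by simpa [Nat.toDigits] using hc)
  case _ => decide
  case _ => simp at h0

-- ---- Chars.replace = pvRep ----
lemma pv_replacego (old nw : List Char) (h : old ≠ []) : ∀ (fuel : Nat) (l acc : List Char),
    l.length ≤ fuel →
    PySem.Chars.replace.go old nw fuel l acc = acc.reverse ++ pvRep old nw l := by
  intro fuel
  induction fuel with
  | zero =>
    intro l acc hl
    have : l = [] := List.eq_nil_of_length_eq_zero (by omega)
    subst this; simp [PySem.Chars.replace.go, pvRep]
  | succ f ih =>
    intro l acc hl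
    cases l with
    | nil => simp [PySem.Chars.replace.go, pvRep]
    | cons c t =>
      rw [PySem.Chars.replace.go, pvRep]
      split
      · rename_i hp
        have hlen : old.length = old.length - 1 + 1 := by
          cases old with | nil => exact absurd rfl h | cons _ _ => simp
        rw [hlen, List.drop_succ_cons]
        rw [ih (t.drop (old.length - 1)) (nw.reverse ++ acc)
            (by have := List.length_drop (l := t) (i := old.length - 1); simp at hl ⊢; omega)]
        simp
      · rw [ih t (c :: acc) (by simp at hl ⊢; omega)]
        simp

lemma pv_replace_eq (l old nw : List Char) (h : old ≠ []) :
    PySem.Chars.replace l old nw = pvRep old nw l := by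
  rw [PySem.Chars.replace, if_neg (by simpa using h)]
  simpa using pv_replacego old nw h l.length l [] le_rfl

-- ---- Chars.count l "*" = l.count '*' ----
lemma pv_countgo : ∀ (fuel : Nat) (l : List Char) (acc : Nat), l.length ≤ fuel →
    PySem.Chars.count.go ['*'] fuel l acc = acc + l.count '*' := by
  intro fuel
  induction fuel with
  | zero =>
    intro l acc hl
    have : l = [] := List.eq_nil_of_length_eq_zero (by omega)
    subst this; simp [PySem.Chars.count.go]
  | succ f ih =>
    intro l acc hl
    cases l with
    | nil => simp [PySem.Chars.count.go]
    | cons c t =>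
      rw [PySem.Chars.count.go]
      by_cases hc : c = '*'
      · subst hc
        rw [if_pos (by simp [List.isPrefixOf])]
        have hdrop : List.drop ['*'].length ('*' :: t) = t := by simp
        rw [hdrop, ih t (acc + 1) (by simp at hl; omega)]
        simp [List.count_cons]; omega
      · rw [if_neg (by simp [List.isPrefixOf]; exact fun h => absurd h.symm hc)]
        rw [ih t acc (by simp at hl; omega)]
        simp [List.count_cons, hc]

lemma pv_count_star (l : List Char) : PySem.Chars.count l ['*'] = l.count '*' := by
  rw [PySem.Chars.count, if_neg (by simp)]
  simpa using pv_countgo l.length l 0 le_rfl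

-- ---- pvB structural lemmas ----
lemma pvB_noStar_append (u v : List Char) (hu : ∀ c ∈ u, c ≠ '*') :
    pvB (u ++ v) 0 = u ++ pvB v 0 := by
  induction u with
  | nil => simp
  | cons c t ih =>
    have hc : c ≠ '*' := hu c (by simp)
    simp only [List.cons_append, pvB, if_neg hc, if_pos rfl]
    rw [ih (fun d hd => hu d (by simp [hd]))]
    simp

lemma pvB_noStar (u : List Char) (hu : ∀ c ∈ u, c ≠ '*') : pvB u 0 = u := by
  have := pvB_noStar_append u [] hu
  simpa [pvB] using this

lemma pvB_stars (m : Nat) (v : List Char) (run : Nat) :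
    pvB (List.replicate m '*' ++ v) run = pvB v (run + m) := by
  induction m generalizing run with
  | zero => simp
  | succ k ih =>
    rw [List.replicate_succ, List.cons_append]
    show pvB ('*' :: (List.replicate k '*' ++ v)) run = pvB v (run + (k + 1))
    rw [pvB, if_pos rfl, ih (run + 1)]
    congr 1; omega

lemma pvB_flush (v : List Char) (run : Nat) (hr : run ≠ 0)
    (hv : ∀ c, v.head? = some c → c ≠ '*') : pvB v run = pvD run ++ pvB v 0 := by
  cases v with
  | nil => simp [pvB, hr]
  | cons c t =>
    have hc : c ≠ '*' := hv c rfl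
    rw [pvB, if_neg hc, if_neg hr, pvB, if_neg hc, if_pos rfl]
    simp

-- ---- a run of stars is a prefix iff it fits in the leading run ----
lemma pv_star_prefix (x : Nat) : ∀ (m : Nat) (v : List Char),
    (∀ c, v.head? = some c → c ≠ '*') →
    (List.replicate x '*' <+: List.replicate m '*' ++ v ↔ x ≤ m) := by
  induction x with
  | zero => intro m v _; simp
  | succ k ih =>
    intro m v hv
    cases m with
    | zero =>
      simp only [List.replicate_zero, List.nil_append, List.replicate_succ]
      constructor
      · intro h
        rcases h with ⟨t, ht⟩
        have : v.head? = some '*' := by rw [← ht]; rfl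
        exact absurd rfl (hv '*' this)
      · omega
    | succ j =>
      rw [List.replicate_succ, List.replicate_succ, List.cons_append, List.cons_prefix_cons]
      simp only [true_and]
      rw [ih j v hv]
      omega

-- ---- pvRunsLE lemmas ----
lemma pvRunsLE_tail (k : Nat) (c : Char) (t : List Char) (h : pvRunsLE k (c :: t)) :
    pvRunsLE k t := fun w hw hs => h w (hw.trans (List.infix_cons_iff.mpr (Or.inr (List.infix_refl t)))) hs

lemma pvRunsLE_drop (k : Nat) (u v : List Char) (h : pvRunsLE k (u ++ v)) :
    pvRunsLE k v := fun w hw hs => h w (hw.trans ⟨u, [], by simp⟩) hs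

lemma pvRunsLE_le (k m : Nat) (v : List Char) (h : pvRunsLE k (List.replicate m '*' ++ v)) :
    m ≤ k := by
  have := h (List.replicate m '*') ⟨[], v, by simp⟩ (by intro c hc; exact List.eq_of_mem_replicate hc)
  simpa using this

lemma pvRunsLE_cons (k : Nat) (c : Char) (t : List Char) (hc : c ≠ '*')
    (h : pvRunsLE k t) : pvRunsLE k (c :: t) := by
  intro w hw hs
  rcases List.infix_cons_iff.mp hw with hp | hi
  · cases w with
    | nil => simp
    | cons d w' =>
      have : d = c := (List.cons_prefix_cons.mp hp).1
      exact absurd (hs d (by simp)) (this ▸ hc)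
  · exact h w hi hs

lemma pvRunsLE_noStar_append (k : Nat) (u v : List Char) (hu : ∀ c ∈ u, c ≠ '*')
    (h : pvRunsLE k v) : pvRunsLE k (u ++ v) := by
  induction u with
  | nil => simpa using h
  | cons c t ih =>
    rw [List.cons_append]
    exact pvRunsLE_cons _ _ _ (hu c (by simp)) (ih (fun d hd => hu d (by simp [hd])))

lemma pvRunsLE_stars_append (k : Nat) : ∀ (m : Nat) (v : List Char),
    (∀ c, v.head? = some c → c ≠ '*') → m ≤ k → pvRunsLE k v →
    pvRunsLE k (List.replicate m '*' ++ v) := by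
  intro m
  induction m with
  | zero => intro v _ _ h; simpa using h
  | succ j ih =>
    intro v hv hm h
    intro w hw hs
    rw [List.replicate_succ, List.cons_append] at hw
    rcases List.infix_cons_iff.mp hw with hp | hi
    · have hw' : w = List.replicate w.length '*' :=
        List.eq_replicate_of_mem hs
      rw [← List.cons_append, ← List.replicate_succ] at hp
      rw [hw'] at hp
      have := (pv_star_prefix w.length (j + 1) v hv).mp hp
      omega
    · exact ih v hv (by omega) h w hi hs

lemma pvRunsLE_count (l : List Char) : pvRunsLE (l.count '*') l := by
  intro w hw hs
  have h1 : w.count '*' = w.length := List.count_eq_length.mpr (by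
    intro c hc; simpa using (hs c hc).symm)
  have h2 : w.count '*' ≤ l.count '*' := hw.sublist.count_le _
  omega

lemma pvRunsLE_zero (l : List Char) (h : pvRunsLE 0 l) : ∀ c ∈ l, c ≠ '*' := by
  intro c hc
  rcases List.append_of_mem hc with ⟨s, t, rfl⟩
  intro hstar
  have := h [c] ⟨s, t, by simp⟩ (by simpa using hstar)
  simp at this

-- ---- pvRep on star patterns ----
lemma pvRep_nil (old nw : List Char) : pvRep old nw [] = [] := by rw [pvRep]

lemma pvRep_cons_ne (x : Nat) (hx : 1 ≤ x) (nw : List Char) (c : Char) (hc : c ≠ '*')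
    (t : List Char) :
    pvRep (List.replicate x '*') nw (c :: t) = c :: pvRep (List.replicate x '*') nw t := by
  rw [pvRep, if_neg]
  rw [List.isPrefixOf_iff_prefix]
  intro hp
  cases x with
  | zero => omega
  | succ j =>
    rw [List.replicate_succ, List.cons_prefix_cons] at hp
    exact hc hp.1.symm

lemma pvRep_stars_eq (x : Nat) (hx : 1 ≤ x) (nw v : List Char) :
    pvRep (List.replicate x '*') nw (List.replicate x '*' ++ v) =
      nw ++ pvRep (List.replicate x '*') nw v := by
  cases x with
  | zero => omega
  | succ j =>
    conv_lhs => rw [List.replicate_succ, List.cons_append, pvRep]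
    rw [if_pos]
    · have hlen : ('*' :: List.replicate j '*').length - 1 = j := by simp
      rw [hlen, List.drop_left' (by simp), ← List.replicate_succ]
    · rw [List.isPrefixOf_iff_prefix, List.cons_prefix_cons]
      exact ⟨rfl, List.prefix_append _ _⟩

lemma pvRep_stars_lt (x : Nat) (hx : 1 ≤ x) (nw : List Char) : ∀ (m : Nat) (v : List Char),
    m < x → (∀ c, v.head? = some c → c ≠ '*') →
    pvRep (List.replicate x '*') nw (List.replicate m '*' ++ v) =
      List.replicate m '*' ++ pvRep (List.replicate x '*') nw v := by
  intro m
  induction m with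
  | zero => intro v _ _; simp
  | succ j ih =>
    intro v hm hv
    rw [List.replicate_succ, List.cons_append, pvRep, if_neg]
    · rw [ih v (by omega) hv]; simp
    · rw [List.isPrefixOf_iff_prefix]
      intro hp
      rw [← List.cons_append, ← List.replicate_succ] at hp
      have := (pv_star_prefix x (j + 1) v hv).mp hp
      omega

-- head of pvRep stays non-star
lemma pvRep_head_ne_star (x : Nat) (hx : 1 ≤ x) (v : List Char)
    (hv : ∀ c, v.head? = some c → c ≠ '*') :
    ∀ c, (pvRep (List.replicate x '*') (pvD x) v).head? = some c → c ≠ '*' := by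
  cases v with
  | nil => intro c hc; rw [pvRep_nil] at hc; simp at hc
  | cons d t =>
    have hd : d ≠ '*' := hv d rfl
    rw [pvRep_cons_ne x hx _ d hd t]
    intro c hc
    simp at hc
    exact hc ▸ hd

lemma pvB_cons_ne (c : Char) (hc : c ≠ '*') (t : List Char) :
    pvB (c :: t) 0 = c :: pvB t 0 := by
  rw [pvB, if_neg hc, if_pos rfl]
  simp

lemma pv_head_dropWhile (l : List Char) (p : Char → Bool) (a : Char)
    (h : (l.dropWhile p).head? = some a) : p a = false := by
  induction l with
  | nil => simp [List.dropWhile] at h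
  | cons c t ih =>
    rw [List.dropWhile_cons] at h
    split at h
    · exact ih h
    · rename_i hpc
      simp at h
      subst h
      simpa using hpc

-- core: one str.replace pass with pattern '*'*x on a string whose star runs are ≤ x
-- replaces exactly the runs of length x and preserves the final run-replacement result
lemma pvCore (x : Nat) (hx : 1 ≤ x) : ∀ (n : Nat) (l : List Char), l.length ≤ n → pvRunsLE x l →
    pvRunsLE (x - 1) (pvRep (List.replicate x '*') (pvD x) l) ∧
    pvB (pvRep (List.replicate x '*') (pvD x) l) 0 = pvB l 0 := by
  intro n
  induction n with
  | zero =>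
    intro l hl _
    have : l = [] := List.eq_nil_of_length_eq_zero (by omega)
    subst this
    exact ⟨by rw [pvRep_nil]; intro w hw hs; rw [List.infix_nil] at hw; simp [hw], by rw [pvRep_nil]⟩
  | succ n ih =>
    intro l hl h
    cases l with
    | nil =>
      exact ⟨by rw [pvRep_nil]; intro w hw hs; rw [List.infix_nil] at hw; simp [hw], by rw [pvRep_nil]⟩
    | cons c t =>
      by_cases hc : c = '*'
      · -- leading star run of length m ≥ 1
        set l := c :: t with hl0
        set m := (l.takeWhile (fun d => d == '*')).length with hm
        set v := l.dropWhile (fun d => d == '*') with hvdef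
        have htake : l.takeWhile (fun d => d == '*') = List.replicate m '*' := by
          rw [List.eq_replicate_iff]
          exact ⟨by rw [hm], by intro b hb; simpa using List.mem_takeWhile_imp hb⟩
        have hsplit : List.replicate m '*' ++ v = l := by
          rw [← htake, hvdef, List.takeWhile_append_dropWhile]
        have hv : ∀ c', v.head? = some c' → c' ≠ '*' := by
          intro c' hc'
          have := pv_head_dropWhile l _ _ hc'
          simpa using this
        have hm1 : 1 ≤ m := by
          rw [hm, hl0, List.takeWhile_cons_of_pos (by simpa using hc)]
          simp
        have hmx : m ≤ x := pvRunsLE_le x m v (by rw [hsplit]; exact h)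
        have hvlen : v.length ≤ n := by
          have hlen2 : m + v.length = l.length := by
            conv_rhs => rw [← hsplit]
            simp
          have hln : l.length ≤ n + 1 := hl
          omega
        have hrv : pvRunsLE x v := pvRunsLE_drop x _ v (by rw [hsplit]; exact h)
        obtain ⟨ih1, ih2⟩ := ih v hvlen hrv
        rcases eq_or_lt_of_le hmx with hmeq | hmlt
        · -- run of exactly x stars: replaced by pvD x
          subst hmeq
          rw [← hsplit, pvRep_stars_eq m hm1 _ v]
          constructor
          · exact pvRunsLE_noStar_append _ _ _ (pvD_ne_star m) ih1
          · rw [pvB_noStar_append _ _ (pvD_ne_star m), ih2, pvB_stars, Nat.zero_add]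
            rw [pvB_flush v m (by omega) hv]
        · -- shorter run: left in place
          rw [← hsplit, pvRep_stars_lt x hx _ m v hmlt hv]
          constructor
          · exact pvRunsLE_stars_append _ m _ (pvRep_head_ne_star x hx v hv) (by omega) ih1
          · rw [pvB_stars, pvB_stars, Nat.zero_add]
            rw [pvB_flush _ m (by omega) (pvRep_head_ne_star x hx v hv), ih2,
                pvB_flush v m (by omega) hv]
      · -- non-star head
        have ht : pvRunsLE x t := pvRunsLE_tail x c t h
        obtain ⟨ih1, ih2⟩ := ih t (by simp at hl; omega) ht
        rw [pvRep_cons_ne x hx _ c hc t]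
        constructor
        · exact pvRunsLE_cons _ c _ hc ih1
        · rw [pvB_cons_ne c hc, pvB_cons_ne c hc, ih2]

-- the whole descending replace loop equals the single-pass result
lemma pvLoop : ∀ (x : Nat) (l : List Char), pvRunsLE x l →
    (PySem.List.pyRange (x : Int) 0 (-1)).foldl
      (fun pattern i =>
        PySem.Chars.replace pattern (List.replicate i.toNat '*')
          ('\\' :: 'd' :: '{' :: (PySem.Int.toStr i).toList ++ ['}'])) l
    = pvB l 0 := by
  intro x
  induction x with
  | zero =>
    intro l h
    rw [PySem.List.pyRange_neg_one_eq_nil (by norm_num)]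
    rw [List.foldl_nil, pvB_noStar l (pvRunsLE_zero l h)]
  | succ k ihk =>
    intro l h
    rw [PySem.List.pyRange_neg_one_cons (by positivity)]
    rw [List.foldl_cons]
    have hcast : ((k + 1 : Nat) : Int) - 1 = (k : Int) := by push_cast; ring
    rw [hcast]
    have hrepl : PySem.Chars.replace l (List.replicate ((k + 1 : Nat) : Int).toNat '*')
        ('\\' :: 'd' :: '{' :: (PySem.Int.toStr ((k + 1 : Nat) : Int)).toList ++ ['}'])
        = pvRep (List.replicate (k + 1) '*') (pvD (k + 1)) l := by
      rw [pv_replace_eq _ _ _ (by simp)]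
      simp [pvD]
    rw [hrepl]
    obtain ⟨h1, h2⟩ := pvCore (k + 1) (by omega) l.length l le_rfl h
    rw [ihk _ (by simpa using h1), h2]

-- ---- B's fold with (out, run) state equals pvB ----
def pvStep (st : List Char × Nat) (ch : Char) : List Char × Nat :=
  if ch = '*' then (st.1, st.2 + 1)
  else if st.2 ≠ 0 then (st.1 ++ ('\\' :: 'd' :: '{' :: (PySem.Int.toStr (st.2 : Int)).toList ++ ['}']) ++ [ch], 0)
  else (st.1 ++ [ch], st.2)

def pvFin (st : List Char × Nat) : List Char :=
  if st.2 ≠ 0 then st.1 ++ ('\\' :: 'd' :: '{' :: (PySem.Int.toStr (st.2 : Int)).toList ++ ['}']) else st.1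

lemma pvFin_eq (st : List Char × Nat) : pvFin st = if st.2 ≠ 0 then st.1 ++ pvD st.2 else st.1 := rfl

lemma pvBfold (l : List Char) : ∀ (acc : List Char) (run : Nat),
    pvFin (l.foldl pvStep (acc, run)) = acc ++ pvB l run := by
  induction l with
  | nil =>
    intro acc run
    by_cases hr : run = 0 <;> simp [pvFin_eq, pvB, hr]
  | cons ch t ih =>
    intro acc run
    rw [List.foldl_cons]
    by_cases hc : ch = '*'
    · subst hc
      rw [show pvStep (acc, run) '*' = (acc, run + 1) from by simp [pvStep]]
      rw [ih acc (run + 1), pvB, if_pos rfl]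
    · by_cases hr : run = 0
      · subst hr
        rw [show pvStep (acc, 0) ch = (acc ++ [ch], 0) from by simp [pvStep, hc]]
        rw [ih (acc ++ [ch]) 0, pvB, if_neg hc, if_pos rfl]
        simp
      · rw [show pvStep (acc, run) ch = (acc ++ pvD run ++ [ch], 0) from by
          simp [pvStep, hc, hr, pvD]]
        rw [ih _ 0, pvB, if_neg hc, if_neg hr]
        simp

-- ---- phase 1 (column construction) agrees ----
lemma pvCol (elements : List String) (x : Int) :
    (PySem.List.sorted
      (elements.foldl (fun s item => PySem.Set.add s ((PySem.Str.pyGet? item x).getD ' ')) PySem.Set.empty)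
      (fun c => c) false).foldl (fun s c => s ++ [c]) ([] : List Char)
    = PySem.List.sorted
        (PySem.Set.ofList (elements.map (fun item => (PySem.Str.pyGet? item x).getD ' ')))
        (fun c => c) false := by
  rw [PySem.Set.ofList_eq_foldl, List.foldl_map]
  rw [PySem.List.foldl_append_singleton_eq_map (fun c => c)]
  simp [PySem.Set.empty]

-- ---- the two ports agree on every input (list level) ----
lemma pvMain (elements : List String) :
    make_pattern_list elements = make_pattern_alt_list elements := by
  rw [make_pattern_list, make_pattern_alt_list]
  have hP :
      (if 1 < elements.length then
        (PySem.List.pyRange 0 ((((PySem.List.pyGet? elements 0).getD "").toList.length : Int)) 1).foldl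
          (fun pattern x =>
            let combinations : PySem.Set Char :=
              elements.foldl (fun s item => PySem.Set.add s ((PySem.Str.pyGet? item x).getD ' ')) PySem.Set.empty
            let combinations := PySem.List.sorted combinations (fun c => c) false
            let string_list : List Char := combinations.foldl (fun s c => s ++ [c]) []
            if string_list.length = 1 then pattern ++ string_list
            else pattern ++ ['['] ++ string_list ++ [']'])
          (([] : List Char) ++ ['^'])
       else ['^'] ++ ((PySem.List.pyGet? elements 0).getD "").toList)
      = (if 1 < elements.length then
          '^' :: ((PySem.List.pyRange 0 ((((PySem.List.pyGet? elements 0).getD "").toList.length : Int)) 1).map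
            (fun x =>
              let s := PySem.List.sorted
                (PySem.Set.ofList (elements.map (fun item => (PySem.Str.pyGet? item x).getD ' ')))
                (fun c => c) false
              if s.length = 1 then s else '[' :: (s ++ [']']))).flatten
         else '^' :: ((PySem.List.pyGet? elements 0).getD "").toList) := by
    split
    · set r := PySem.List.pyRange 0 ((((PySem.List.pyGet? elements 0).getD "").toList.length : Int)) 1 with hr
      have hfun : (fun (pattern : List Char) (x : Int) =>
            let combinations : PySem.Set Char :=
              elements.foldl (fun s item => PySem.Set.add s ((PySem.Str.pyGet? item x).getD ' ')) PySem.Set.empty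
            let combinations := PySem.List.sorted combinations (fun c => c) false
            let string_list : List Char := combinations.foldl (fun s c => s ++ [c]) []
            if string_list.length = 1 then pattern ++ string_list
            else pattern ++ ['['] ++ string_list ++ [']'])
          = (fun (pattern : List Char) (x : Int) => pattern ++
              (let s := PySem.List.sorted
                (PySem.Set.ofList (elements.map (fun item => (PySem.Str.pyGet? item x).getD ' ')))
                (fun c => c) false
               if s.length = 1 then s else '[' :: (s ++ [']']))) := by
        funext pattern x
        simp only [pvCol elements x]
        split
        · rfl
        · simp
      rw [hfun, PySem.List.foldl_append_eq_flatMap]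
      rw [List.flatMap_def]
      simp
    · simp
  rw [hP]
  have hB : ∀ (q : List Char),
      (let st := q.foldl
        (fun (st : List Char × Nat) ch =>
          if ch = '*' then (st.1, st.2 + 1)
          else if st.2 ≠ 0 then (st.1 ++ ('\\' :: 'd' :: '{' :: (PySem.Int.toStr (st.2 : Int)).toList ++ ['}']) ++ [ch], 0)
          else (st.1 ++ [ch], st.2)) ([], 0);
       (if st.2 ≠ 0 then st.1 ++ ('\\' :: 'd' :: '{' :: (PySem.Int.toStr (st.2 : Int)).toList ++ ['}']) else st.1))
      = [] ++ pvB q 0 := fun q => pvBfold q [] 0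
  rw [hB]
  set p := (if 1 < elements.length then
          '^' :: ((PySem.List.pyRange 0 ((((PySem.List.pyGet? elements 0).getD "").toList.length : Int)) 1).map
            (fun x =>
              let s := PySem.List.sorted
                (PySem.Set.ofList (elements.map (fun item => (PySem.Str.pyGet? item x).getD ' ')))
                (fun c => c) false
              if s.length = 1 then s else '[' :: (s ++ [']']))).flatten
         else '^' :: ((PySem.List.pyGet? elements 0).getD "").toList) with hp
  rw [pv_count_star]
  by_cases hc : 0 < p.count '*'
  · rw [if_pos hc]
    rw [pvLoop (p.count '*') p (pvRunsLE_count p)]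
    simp
  · rw [if_neg hc]
    have : ∀ c ∈ p, c ≠ '*' := by
      intro c hcp hstar
      have := List.count_pos_iff.mpr (hstar ▸ hcp)
      omega
    rw [pvB_noStar p this]
    simp


-- ===== VERDICT (by name: the statement is the Claim_ definition above) =====
theorem make_pattern_spec : Claim_equal_make_pattern := by
  intro elements _ _
  unfold Spec_make_pattern make_pattern make_pattern_alt
  rw [pvMain]
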